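-- pv_equiv track=rewrite | github.com/valliv2007/Algorithmic-Tasks | sleight_of_hand_2.py | score_point
-- ===== SOURCE A (Python) =====
-- from collections import defaultdict
-- from typing import List, Tuple
--
-- def score_point(digits: List[str], number_fingers: int) -> int:
--     players = 2
--     players_fingers = number_fingers * players
--     symbols = defaultdict(int)
--     symbols_greater_fingers = set()
--     points = 0
--     for digit in digits:
--         symbols[digit] += 1
--         if symbols[digit] == 1:
--             points += 1
--         if symbols[digit] > players_fingers:
--             symbols_greater_fingers.add(digit)
--     return points - len(symbols_greater_fingers)
-- ===== SOURCE B (Python) =====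
-- from typing import List
--
--
-- def score_point(digits: List[str], number_fingers: int) -> int:
--     threshold = number_fingers * 2
--     s = sorted(digits)
--     points = 0
--     i = 0
--     n = len(s)
--     while i < n:
--         j = i + 1
--         while j < n and s[j] == s[i]:
--             j += 1
--         if j - i <= threshold:
--             points += 1
--         i = j
--     return points
-- ===== Notes on version B (the rewrite author's own statement) =====
-- stated objective: alternative
-- what changed: Replaces A's single hash-based pass (defaultdict tally with incremental ==1 distinct tracking and an over-threshold set) by sort-then-scan: sort the list, then walk adjacent equal runs with two indices and count each run of length at most 2*number_fingers.
import Mathlib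
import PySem

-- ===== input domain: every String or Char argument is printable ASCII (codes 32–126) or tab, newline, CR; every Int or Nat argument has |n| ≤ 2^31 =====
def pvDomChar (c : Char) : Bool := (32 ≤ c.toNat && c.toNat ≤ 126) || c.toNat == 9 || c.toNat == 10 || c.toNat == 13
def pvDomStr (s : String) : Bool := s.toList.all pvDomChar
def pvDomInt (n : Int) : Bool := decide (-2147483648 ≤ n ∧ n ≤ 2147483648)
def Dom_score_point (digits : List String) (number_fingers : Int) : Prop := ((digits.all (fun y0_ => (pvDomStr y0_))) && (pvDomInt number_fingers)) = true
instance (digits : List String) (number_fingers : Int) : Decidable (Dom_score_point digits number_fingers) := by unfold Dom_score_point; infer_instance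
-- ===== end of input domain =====

-- B replaces A's single hash-based pass (tally + incremental distinct tracking + over-threshold set)
-- by sort-then-scan over adjacent equal runs; same return value, proved equal.

-- ===== PORT A =====
-- one loop step of A's for-loop: (symbols, symbols_greater_fingers, points)
def score_point_step (players_fingers : Int)
    (st : PySem.Dict String Int × PySem.Set String × Int) (digit : String) :
    PySem.Dict String Int × PySem.Set String × Int :=
  let symbols := st.1.modify digit 0 (· + 1)
  let c := symbols.getD digit 0
  let points := if c == 1 then st.2.2 + 1 else st.2.2
  let sgf := if c > players_fingers then PySem.Set.add st.2.1 digit else st.2.1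
  (symbols, sgf, points)

def score_point (digits : List String) (number_fingers : Int) : Int :=
  let players : Int := 2
  let players_fingers := number_fingers * players
  let st := digits.foldl (score_point_step players_fingers)
      (PySem.Dict.empty, PySem.Set.empty, (0 : Int))
  st.2.2 - (PySem.Set.len st.2.1 : Int)

-- ===== PORT B =====
-- inner while loop of B: advance j past the elements equal to s[i];
-- returns (number of equal elements skipped, the remaining suffix)
def score_point_run (x : String) : List String → Nat × List String
  | [] => (0, [])
  | y :: ys =>
      if y == x then
        let p := score_point_run x ys
        (p.1 + 1, p.2)
      else (0, y :: ys)

-- the remaining suffix never grows (termination of the outer while loop)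
lemma score_point_run_length_le (x : String) (l : List String) :
    (score_point_run x l).2.length ≤ l.length := by
  induction l with
  | nil => simp [score_point_run]
  | cons y ys ih =>
    by_cases h : (y == x) = true
    · simp only [score_point_run, h, if_pos]
      exact Nat.le_trans ih (Nat.le_succ _)
    · simp [score_point_run, h]

-- outer while loop of B over the sorted list: each run contributes 1 point iff its length ≤ threshold
def score_point_runs (threshold : Int) : List String → Int
  | [] => 0
  | x :: ys =>
      let p := score_point_run x ys
      (if ((p.1 : Int) + 1 ≤ threshold) then 1 else 0) + score_point_runs threshold p.2
  termination_by l => l.length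
  decreasing_by
    simpa using Nat.lt_succ_of_le (score_point_run_length_le x ys)

def score_point_alt (digits : List String) (number_fingers : Int) : Int :=
  let threshold := number_fingers * 2
  let s := PySem.List.sorted digits (fun x => x) false
  score_point_runs threshold s

-- ===== PRECONDITION & SPEC =====
def Spec_score_point (digits : List String) (number_fingers : Int) (out : Int) : Prop := out = score_point_alt digits number_fingers
instance (digits : List String) (number_fingers : Int) (out : Int) : Decidable (Spec_score_point digits number_fingers out) := by unfold Spec_score_point; infer_instance

-- ===== CLAIM (what is proved, stated in full; the proofs are below) =====
def Claim_equal_score_point : Prop := ∀ (digits : List String) (number_fingers : Int), Dom_score_point digits number_fingers → Spec_score_point digits number_fingers (score_point digits number_fingers)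

-- ===== LEMMAS AND PROOFS =====

-- invariant of A's loop: after processing xs the dict is counter xs, points is the
-- number of distinct symbols, and sgf is a nodup list holding exactly the symbols
-- whose count exceeds the threshold
lemma score_point_loop_inv (t : Int) (l : List String) :
    ∀ (xs : List String) (s : List String), s.Nodup →
    (∀ y, y ∈ s ↔ y ∈ xs ∧ ((xs.count y : Int) > t)) →
    (l.foldl (score_point_step t)
        (PySem.Dict.counter xs, s, ((PySem.Set.ofList xs).length : Int))) =
      (PySem.Dict.counter (xs ++ l),
        (l.foldl (score_point_step t)
          (PySem.Dict.counter xs, s, ((PySem.Set.ofList xs).length : Int))).2.1,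
        ((PySem.Set.ofList (xs ++ l)).length : Int)) ∧
    (l.foldl (score_point_step t)
        (PySem.Dict.counter xs, s, ((PySem.Set.ofList xs).length : Int))).2.1.Nodup ∧
    (∀ y, y ∈ (l.foldl (score_point_step t)
        (PySem.Dict.counter xs, s, ((PySem.Set.ofList xs).length : Int))).2.1 ↔
      y ∈ xs ++ l ∧ (((xs ++ l).count y : Int) > t)) := by
  induction l with
  | nil =>
    intro xs s hnd hmem
    refine ⟨by simp, hnd, by simpa using hmem⟩
  | cons x l ih =>
    intro xs s hnd hmem
    have hdict : (PySem.Dict.counter xs).modify x 0 (· + 1) = PySem.Dict.counter (xs ++ [x]) := by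
      rw [PySem.Dict.counter_eq_foldl, PySem.Dict.counter_eq_foldl, List.foldl_append]
      rfl
    have hget : (PySem.Dict.counter (xs ++ [x])).getD x 0 = (xs.count x : Int) + 1 := by
      rw [PySem.Dict.getD_counter]
      simp
    have hstep : score_point_step t (PySem.Dict.counter xs, s, ((PySem.Set.ofList xs).length : Int)) x
        = (PySem.Dict.counter (xs ++ [x]),
           (if ((xs.count x : Int) + 1 > t) then PySem.Set.add s x else s),
           (if ((xs.count x : Int) + 1 == 1) then ((PySem.Set.ofList xs).length : Int) + 1
            else ((PySem.Set.ofList xs).length : Int))) := by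
      simp only [score_point_step, hdict, hget]
    have hofl : PySem.Set.ofList (xs ++ [x]) = PySem.Set.add (PySem.Set.ofList xs) x := by
      rw [PySem.Set.ofList_eq_foldl, PySem.Set.ofList_eq_foldl, List.foldl_append]
      rfl
    have hpts : (if ((xs.count x : Int) + 1 == 1) then ((PySem.Set.ofList xs).length : Int) + 1
        else ((PySem.Set.ofList xs).length : Int)) = ((PySem.Set.ofList (xs ++ [x])).length : Int) := by
      rw [hofl]
      by_cases hx : x ∈ xs
      · have : xs.count x ≠ 0 := by simpa [List.count_eq_zero] using hx
        have h1 : ¬ ((xs.count x : Int) + 1 == 1) := by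
          simp only [beq_iff_eq]; omega
        rw [if_neg h1]
        have : PySem.Set.add (PySem.Set.ofList xs) x = PySem.Set.ofList xs := by
          simp [PySem.Set.add, PySem.Set.contains_eq_listContains, PySem.Set.mem_ofList, hx]
        rw [this]
      · have h0 : xs.count x = 0 := by simpa [List.count_eq_zero] using hx
        have h1 : ((xs.count x : Int) + 1 == 1) = true := by
          simp [h0]
        rw [if_pos h1]
        have : PySem.Set.add (PySem.Set.ofList xs) x = PySem.Set.ofList xs ++ [x] := by
          simp [PySem.Set.add, PySem.Set.contains_eq_listContains, PySem.Set.mem_ofList, hx]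
        rw [this]
        simp
    set s' := (if ((xs.count x : Int) + 1 > t) then PySem.Set.add s x else s) with hs'
    have hnd' : s'.Nodup := by
      rw [hs']; split_ifs
      · exact PySem.Set.nodup_add _ _ hnd
      · exact hnd
    have hmem' : ∀ y, y ∈ s' ↔ y ∈ xs ++ [x] ∧ (((xs ++ [x]).count y : Int) > t) := by
      intro y
      by_cases hyx : y = x
      · subst hyx
        have hc : ((xs ++ [y]).count y : Int) = (xs.count y : Int) + 1 := by simp
        rw [hs']
        split_ifs with hgt
        · simp [PySem.Set.mem_add, hgt]
        · constructor
          · intro hy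
            exact absurd ((hmem y).1 hy).2 (by omega)
          · rintro ⟨-, h2⟩
            rw [hc] at h2; omega
      · have hc : ((xs ++ [x]).count y : Int) = (xs.count y : Int) := by
          simp [List.count_append, Ne.symm hyx]
        have hmemy : y ∈ xs ++ [x] ↔ y ∈ xs := by
          constructor
          · intro h
            rcases List.mem_append.1 h with h | h
            · exact h
            · exact absurd (List.mem_singleton.1 h) hyx
          · intro h; exact List.mem_append.2 (Or.inl h)
        rw [hc, hmemy, ← hmem y, hs']
        split_ifs
        · rw [PySem.Set.mem_add]
          constructor
          · rintro (h | h)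
            · exact h
            · exact absurd h hyx
          · exact Or.inl
        · rfl
    have := ih (xs ++ [x]) s' hnd' hmem'
    rw [List.foldl_cons, hstep, hpts]
    simpa [List.append_assoc] using this

-- two nodup lists with the same members have the same length
lemma length_eq_of_nodup_mem {α : Type} (s t : List α) (hs : s.Nodup) (ht : t.Nodup)
    (h : ∀ y, y ∈ s ↔ y ∈ t) : s.length = t.length :=
  List.Perm.length_eq ((List.perm_ext_iff_of_nodup hs ht).2 h)

-- score_point_run splits off the leading run of x: the prefix is replicate, and
-- the first remaining element (if any) differs from x
lemma score_point_run_spec (x : String) (l : List String) :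
    l = List.replicate (score_point_run x l).1 x ++ (score_point_run x l).2 ∧
    (∀ z, (score_point_run x l).2.head? = some z → z ≠ x) := by
  induction l with
  | nil => simp [score_point_run]
  | cons y ys ih =>
    by_cases h : (y == x) = true
    · have hyx : y = x := by simpa using h
      simp only [score_point_run, h, if_pos]
      refine ⟨?_, ih.2⟩
      conv_lhs => rw [hyx]
      conv_lhs => rw [ih.1]
      simp [List.replicate_succ]
    · simp only [score_point_run, h, if_neg, Bool.false_eq_true, not_false_iff]
      refine ⟨by simp, ?_⟩
      intro z hz
      simp only [List.head?_cons, Option.some.injEq] at hz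
      subst hz
      simpa using h

-- B's outer loop on a (≤)-sorted list counts the distinct symbols whose total
-- count is at most the threshold
lemma score_point_runs_sorted (t : Int) : ∀ (n : Nat) (s : List String), s.length = n →
    s.Pairwise (· ≤ ·) →
    score_point_runs t s =
      (((PySem.Set.ofList s).countP (fun k => decide ((s.count k : Int) ≤ t))) : Int) := by
  intro n
  induction n using Nat.strong_induction_on with
  | _ n ih =>
    intro s hlen hp
    match s with
    | [] => simp [score_point_runs]
    | x :: ys =>
      obtain ⟨hsplit, hhead⟩ := score_point_run_spec x ys
      have hle : ∀ y ∈ ys, x ≤ y := fun y hy => (List.pairwise_cons.1 hp).1 y hy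
      have hpr : (score_point_run x ys).2.Pairwise (· ≤ ·) := by
        have hsub : (score_point_run x ys).2.Sublist ys := by
          conv_rhs => rw [hsplit]
          exact List.sublist_append_right _ _
        exact ((List.pairwise_cons.1 hp).2).sublist hsub
      have hxr : x ∉ (score_point_run x ys).2 := by
        intro hxmem
        cases hR : (score_point_run x ys).2 with
        | nil => rw [hR] at hxmem; simp at hxmem
        | cons z rest =>
          have hz : z ≠ x := hhead z (by rw [hR]; rfl)
          have hzys : z ∈ ys := by rw [hsplit, hR]; simp
          have hxz : x ≤ z := hle z hzys
          rw [hR] at hxmem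
          rcases List.mem_cons.1 hxmem with h | h
          · exact hz h.symm
          · rw [hR] at hpr
            have hzx : z ≤ x := (List.pairwise_cons.1 hpr).1 x h
            exact hz (le_antisymm hzx hxz)
      have hcountx : (x :: ys).count x = (score_point_run x ys).1 + 1 := by
        conv_lhs => rw [hsplit]
        have h0 : (score_point_run x ys).2.count x = 0 := List.count_eq_zero.2 hxr
        simp [List.count_append, h0]
      have hcountk : ∀ k, k ≠ x → (x :: ys).count k = (score_point_run x ys).2.count k := by
        intro k hk
        conv_lhs => rw [hsplit]
        simp [List.count_append, List.count_replicate, Ne.symm hk]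
      have hmemofl : ∀ y, y ∈ PySem.Set.ofList (x :: ys) ↔
          y ∈ x :: PySem.Set.ofList (score_point_run x ys).2 := by
        intro y
        simp only [PySem.Set.mem_ofList, List.mem_cons]
        conv_lhs => rw [hsplit]
        simp only [List.mem_append, List.mem_replicate]
        constructor
        · rintro (h | ⟨-, h⟩ | h)
          · exact Or.inl h
          · exact Or.inl h
          · exact Or.inr h
        · rintro (h | h)
          · exact Or.inl h
          · exact Or.inr (Or.inr h)
      have hperm : (PySem.Set.ofList (x :: ys)).Perm
          (x :: PySem.Set.ofList (score_point_run x ys).2) := by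
        refine (List.perm_ext_iff_of_nodup (PySem.Set.nodup_ofList _) ?_).2 hmemofl
        exact List.nodup_cons.2
          ⟨fun h => hxr ((PySem.Set.mem_ofList _ _).1 h), PySem.Set.nodup_ofList _⟩
      have hcountP : (PySem.Set.ofList (x :: ys)).countP
            (fun k => decide (((x :: ys).count k : Int) ≤ t))
          = (if (((score_point_run x ys).1 : Int) + 1 ≤ t) then 1 else 0) +
            (PySem.Set.ofList (score_point_run x ys).2).countP
              (fun k => decide (((score_point_run x ys).2.count k : Int) ≤ t)) := by
        rw [hperm.countP_eq, List.countP_cons]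
        have h2 : (PySem.Set.ofList (score_point_run x ys).2).countP
              (fun k => decide (((x :: ys).count k : Int) ≤ t))
            = (PySem.Set.ofList (score_point_run x ys).2).countP
              (fun k => decide (((score_point_run x ys).2.count k : Int) ≤ t)) := by
          apply List.countP_congr
          intro k hk
          have hkmem : k ∈ (score_point_run x ys).2 := (PySem.Set.mem_ofList _ _).1 hk
          have hkx : k ≠ x := fun h => hxr (h ▸ hkmem)
          rw [hcountk k hkx]
        rw [h2]
        have h1 : (decide (((x :: ys).count x : Int) ≤ t))
            = decide (((score_point_run x ys).1 : Int) + 1 ≤ t) := by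
          rw [hcountx]; push_cast; rfl
        rw [h1]
        by_cases hc : ((score_point_run x ys).1 : Int) + 1 ≤ t <;>
          simp [hc, Nat.add_comm]
      have hlt : (score_point_run x ys).2.length < n := by
        have h1 := score_point_run_length_le x ys
        have h2 : (x :: ys).length = ys.length + 1 := List.length_cons
        omega
      have ihr := ih (score_point_run x ys).2.length hlt (score_point_run x ys).2 rfl hpr
      rw [score_point_runs, ihr, hcountP]
      push_cast
      by_cases hc : ((score_point_run x ys).1 : Int) + 1 ≤ t
      · simp [hc]
      · simp [hc]

-- ===== VERDICT (by name: the statement is the Claim_ definition above) =====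
theorem score_point_spec : Claim_equal_score_point := by
  intro digits number_fingers _
  unfold Spec_score_point score_point score_point_alt
  dsimp only
  -- A's value via the loop invariant
  have e0 : (PySem.Dict.counter ([] : List String), ([] : PySem.Set String),
      (((PySem.Set.ofList ([] : List String)).length : Nat) : Int))
      = (PySem.Dict.empty, (PySem.Set.empty : PySem.Set String), (0 : Int)) := rfl
  obtain ⟨heq, hnd, hmem⟩ := score_point_loop_inv (number_fingers * 2) digits [] []
    (by simp) (by intro y; simp)
  rw [e0] at heq hnd hmem
  simp only [List.nil_append] at heq hnd hmem
  rw [heq]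
  simp only [PySem.Set.len]
  have hlen : ((List.foldl (score_point_step (number_fingers * 2))
        (PySem.Dict.empty, PySem.Set.empty, (0 : Int)) digits).2.1).length
      = (PySem.Set.ofList digits).countP
          (fun k => decide ((digits.count k : Int) > number_fingers * 2)) := by
    rw [List.countP_eq_length_filter]
    refine length_eq_of_nodup_mem _ _ hnd (List.Nodup.filter _ (PySem.Set.nodup_ofList _)) ?_
    intro y
    rw [hmem y, List.mem_filter, PySem.Set.mem_ofList]
    simp
  rw [hlen]
  -- B's value via the sorted-runs lemma
  have hsp : (PySem.List.sorted digits (fun x => x) false).Pairwise (· ≤ ·) :=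
    PySem.List.sorted_pairwise digits (fun x => x)
  have hperm : (PySem.List.sorted digits (fun x => x) false).Perm digits :=
    PySem.List.sorted_perm digits (fun x => x) false
  have hB : score_point_runs (number_fingers * 2) (PySem.List.sorted digits (fun x => x) false) =
      (((PySem.Set.ofList digits).countP
          (fun k => decide ((digits.count k : Int) ≤ number_fingers * 2))) : Int) := by
    rw [score_point_runs_sorted _ _ _ rfl hsp]
    congr 1
    have hpermofl : (PySem.Set.ofList (PySem.List.sorted digits (fun x => x) false)).Perm
        (PySem.Set.ofList digits) := by
      refine (List.perm_ext_iff_of_nodup (PySem.Set.nodup_ofList _) (PySem.Set.nodup_ofList _)).2 ?_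
      intro y
      rw [PySem.Set.mem_ofList, PySem.Set.mem_ofList]
      exact hperm.mem_iff
    rw [hpermofl.countP_eq]
    apply List.countP_congr
    intro k _
    rw [hperm.count_eq]
  rw [hB]
  -- distinct = (count ≤ t) + (count > t)
  have hsplit := List.length_eq_countP_add_countP
    (l := PySem.Set.ofList digits) (p := fun k => decide ((digits.count k : Int) ≤ number_fingers * 2))
  have hcompl : (PySem.Set.ofList digits).countP
        (fun a => decide (¬ decide ((digits.count a : Int) ≤ number_fingers * 2) = true))
      = (PySem.Set.ofList digits).countP
          (fun k => decide ((digits.count k : Int) > number_fingers * 2)) := by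
    apply List.countP_congr
    intro k _
    by_cases h : (digits.count k : Int) ≤ number_fingers * 2
    · simp [h]
    · simp [h]
      omega
  rw [hcompl] at hsplit
  omega
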